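-- pv_equiv track=rewrite | github.com/HenryF23/GitLab-Analyzer | server/manager/code_diff_temp.py | check_for_spacing_or_comment
-- ===== SOURCE A (Python) =====
-- def check_for_spacing_or_comment(
--     signal, newCommentLine, deleteCommentLine, spacing, str, python
-- ) -> bool:
--
--     for i in str:
--         if i == " ":
--             continue
--         elif i == "#" and python is True:
--             if signal == '+':
--                 newCommentLine = newCommentLine + 1
--             else:
--                 deleteCommentLine = deleteCommentLine + 1
--             return True
--         elif i == "//" and python is False:
--             if signal == '+':
--                 newCommentLine = newCommentLine + 1
--             else:
--                 deleteCommentLine = deleteCommentLine + 1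
--             return True
--         else:
--             break
--     if str.isspace():
--         spacing = spacing + 1
--         return True
--
--     return False
-- ===== SOURCE B (Python) =====
-- def check_for_spacing_or_comment(
--     signal, newCommentLine, deleteCommentLine, spacing, str, python
-- ) -> bool:
--     stripped = str.lstrip(' ')
--     if python is True and stripped.startswith('#'):
--         return True
--     return str.isspace()
-- ===== Notes on version B (the rewrite author's own statement) =====
-- stated objective: simpler
-- what changed: Replaces the explicit character loop (with its dead '//' branch and dead counter increments) by one lstrip(' ')+startswith('#') test followed by str.isspace().
import Mathlib
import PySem

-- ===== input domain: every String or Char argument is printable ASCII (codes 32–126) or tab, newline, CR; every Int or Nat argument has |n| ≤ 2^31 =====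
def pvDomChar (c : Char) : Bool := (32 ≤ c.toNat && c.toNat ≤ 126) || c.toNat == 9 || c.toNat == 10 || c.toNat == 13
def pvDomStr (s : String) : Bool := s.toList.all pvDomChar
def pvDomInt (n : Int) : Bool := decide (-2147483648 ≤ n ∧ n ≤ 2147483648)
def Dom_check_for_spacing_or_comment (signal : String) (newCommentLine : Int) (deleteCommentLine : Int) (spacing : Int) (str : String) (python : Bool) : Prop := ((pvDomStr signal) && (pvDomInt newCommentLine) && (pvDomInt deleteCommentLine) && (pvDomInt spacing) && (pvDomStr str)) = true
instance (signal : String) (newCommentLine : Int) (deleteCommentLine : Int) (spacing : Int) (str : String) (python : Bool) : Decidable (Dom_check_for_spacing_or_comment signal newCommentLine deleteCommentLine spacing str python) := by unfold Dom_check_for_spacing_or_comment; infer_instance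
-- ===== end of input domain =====

-- ===== PORT A =====
-- B replaces A's explicit character loop (dead '//' branch, dead counter increments) by
-- lstrip(' ') + startswith('#') and isspace; return-value equivalence only (A's rebinding of
-- its int parameters is local and unobservable).
-- Loop of A: returns true if it hits a comment start; otherwise (break or exhaustion) falls through.
def pvALoop (cs : List Char) (signal : String) (python : Bool) : Bool :=
  match cs with
  | [] => false
  | c :: rest =>
    if c == ' ' then pvALoop rest signal python
    else if c == '#' && python then true
    -- literal port of `elif i == "//" and python is False`: a 1-char string compared to "//"
    else if String.ofList [c] == "//" && !python then true
    else false

def check_for_spacing_or_comment (signal : String) (newCommentLine : Int) (deleteCommentLine : Int) (spacing : Int) (str : String) (python : Bool) : Bool :=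
  if pvALoop str.toList signal python then true
  else if PySem.Str.strIsspace str then true
  else false

-- ===== PORT B =====
def check_for_spacing_or_comment_alt (signal : String) (newCommentLine : Int) (deleteCommentLine : Int) (spacing : Int) (str : String) (python : Bool) : Bool :=
  -- str.lstrip(' ') ported exactly as dropping leading space characters
  let stripped := str.toList.dropWhile (fun c => c == ' ')
  if python && PySem.Chars.startswith stripped ['#'] then true
  else PySem.Str.strIsspace str

-- ===== PRECONDITION & SPEC =====
def Spec_check_for_spacing_or_comment (signal : String) (newCommentLine : Int) (deleteCommentLine : Int) (spacing : Int) (str : String) (python : Bool) (out : Bool) : Prop := out = check_for_spacing_or_comment_alt signal newCommentLine deleteCommentLine spacing str python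
instance (signal : String) (newCommentLine : Int) (deleteCommentLine : Int) (spacing : Int) (str : String) (python : Bool) (out : Bool) : Decidable (Spec_check_for_spacing_or_comment signal newCommentLine deleteCommentLine spacing str python out) := by unfold Spec_check_for_spacing_or_comment; infer_instance

-- ===== CLAIM (what is proved, stated in full; the proofs are below) =====
def Claim_equal_check_for_spacing_or_comment : Prop := ∀ (signal : String) (newCommentLine : Int) (deleteCommentLine : Int) (spacing : Int) (str : String) (python : Bool), Dom_check_for_spacing_or_comment signal newCommentLine deleteCommentLine spacing str python → Spec_check_for_spacing_or_comment signal newCommentLine deleteCommentLine spacing str python (check_for_spacing_or_comment signal newCommentLine deleteCommentLine spacing str python)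

-- ===== LEMMAS AND PROOFS =====

lemma pvMkSingleton_ne_slashes (c : Char) : (String.ofList [c] == "//") = false := by
  simp only [beq_eq_false_iff_ne, ne_eq, String.ext_iff]
  intro h
  have h2 : (String.ofList [c]).toList = "//".toList := by rw [h]
  rw [String.toList_ofList] at h2
  exact absurd (congrArg List.length h2) (by simp)

lemma pvALoop_eq (cs : List Char) (signal : String) (python : Bool) :
    pvALoop cs signal python
      = (python && PySem.Chars.startswith (cs.dropWhile (fun c => c == ' ')) ['#']) := by
  induction cs with
  | nil => simp [pvALoop, PySem.Chars.startswith]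
  | cons c rest ih =>
    by_cases h : c = ' '
    · subst h
      simpa [pvALoop, List.dropWhile] using ih
    · have hc : (c == ' ') = false := by simp [h]
      simp only [pvALoop, List.dropWhile, hc, if_neg, Bool.false_eq_true, not_false_iff,
        pvMkSingleton_ne_slashes, Bool.false_and]
      by_cases h2 : c = '#'
      · subst h2; simp [PySem.Chars.startswith]
      · simp [PySem.Chars.startswith, List.isPrefixOf, h2, Ne.symm h2]

-- ===== VERDICT (by name: the statement is the Claim_ definition above) =====
theorem check_for_spacing_or_comment_spec : Claim_equal_check_for_spacing_or_comment := by
  intro signal n d sp str python _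
  unfold Spec_check_for_spacing_or_comment check_for_spacing_or_comment check_for_spacing_or_comment_alt
  rw [pvALoop_eq]
  by_cases h : (python && PySem.Chars.startswith (str.toList.dropWhile (fun c => c == ' ')) ['#']) = true
  · simp [h]
  · simp [h]
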